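-- pv_equiv track=rewrite | github.com/ChriGarzo/Meme-Detoxification-EE-559-Mini-Project- | inference/run_stage1_rewrites_only_sharded.py | most_common_reason
-- ===== SOURCE A (Python) =====
-- from typing import Any, Dict, List, Optional, Tuple
--
-- def most_common_reason(reasons: List[str], fallback: str = "empty") -> str:
--     counts: Dict[str, int] = {}
--     for reason in reasons:
--         if not reason:
--             continue
--         counts[reason] = counts.get(reason, 0) + 1
--     if not counts:
--         return fallback
--     return max(counts.items(), key=lambda kv: (kv[1], kv[0]))[0]
-- ===== SOURCE B (Python) =====
-- from typing import List
--
-- def most_common_reason(reasons: List[str], fallback: str = "empty") -> str: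
--     best = (0, fallback)
--     for r in reasons:
--         if r:
--             key = (reasons.count(r), r)
--             if key > best:
--                 best = key
--     return best[1]
-- ===== Notes on version B (the rewrite author's own statement) =====
-- stated objective: simpler
-- what changed: Replaces the dict-counting pass followed by max over dict items with a single fold that keeps the lexicographically best (count, reason) pair, computing each count directly with list.count and using no dict and no max built-in.
import Mathlib
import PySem

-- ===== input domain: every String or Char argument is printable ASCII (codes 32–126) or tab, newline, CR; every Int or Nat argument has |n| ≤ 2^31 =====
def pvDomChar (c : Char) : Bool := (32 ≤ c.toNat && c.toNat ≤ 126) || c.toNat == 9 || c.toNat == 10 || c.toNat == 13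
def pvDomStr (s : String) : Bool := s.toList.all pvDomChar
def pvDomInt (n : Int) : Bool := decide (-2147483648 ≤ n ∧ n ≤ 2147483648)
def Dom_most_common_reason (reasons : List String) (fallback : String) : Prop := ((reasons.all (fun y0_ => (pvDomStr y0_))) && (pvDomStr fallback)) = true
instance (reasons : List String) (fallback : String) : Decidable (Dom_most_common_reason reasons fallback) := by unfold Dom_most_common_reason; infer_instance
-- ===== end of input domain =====

-- B replaces A's dict-count pass followed by max over dict items with a single fold that keeps
-- the lexicographically best (count, reason) pair, counting via list.count: simpler, not faster.

-- ===== PORT A =====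
def most_common_reason (reasons : List String) (fallback : String) : String :=
  -- counts: Dict[str, int] built by the guarded counting loop
  let counts : PySem.Dict String Int :=
    reasons.foldl
      (fun d reason => if reason = "" then d else d.insert reason (d.getD reason 0 + 1))
      PySem.Dict.empty
  if counts.items = [] then fallback
  else
    -- max(counts.items(), key=lambda kv: (kv[1], kv[0]))[0]; items ≠ [] here, so max2? is some
    ((PySem.List.max2? counts.items (fun kv => kv.2) (fun kv => kv.1)).map Prod.fst).getD fallback

-- ===== PORT B =====
def most_common_reason_alt (reasons : List String) (fallback : String) : String :=
  (reasons.foldl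
    (fun best r =>
      if r = "" then best
      else
        -- key = (reasons.count(r), r); if key > best: best = key
        if best.1 < (reasons.count r : Int) ∨ (best.1 = (reasons.count r : Int) ∧ best.2 < r)
        then ((reasons.count r : Int), r) else best)
    ((0 : Int), fallback)).2

-- ===== PRECONDITION & SPEC =====
def Spec_most_common_reason (reasons : List String) (fallback : String) (out : String) : Prop := out = most_common_reason_alt reasons fallback
instance (reasons : List String) (fallback : String) (out : String) : Decidable (Spec_most_common_reason reasons fallback out) := by unfold Spec_most_common_reason; infer_instance

-- ===== CLAIM (what is proved, stated in full; the proofs are below) =====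
def Claim_equal_most_common_reason : Prop := ∀ (reasons : List String) (fallback : String), Dom_most_common_reason reasons fallback → Spec_most_common_reason reasons fallback (most_common_reason reasons fallback)

-- ===== LEMMAS AND PROOFS =====

-- Python's lexicographic ≤ on (int, str) pairs.
def pvLexLe (p q : Int × String) : Prop := p.1 < q.1 ∨ (p.1 = q.1 ∧ p.2 ≤ q.2)

theorem pvLexLe_refl (p : Int × String) : pvLexLe p p := Or.inr ⟨rfl, le_refl _⟩

theorem pvLexLe_trans {p q r : Int × String} (h1 : pvLexLe p q) (h2 : pvLexLe q r) : pvLexLe p r := by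
  rcases h1 with h1 | ⟨h1a, h1b⟩ <;> rcases h2 with h2 | ⟨h2a, h2b⟩
  · exact Or.inl (lt_trans h1 h2)
  · exact Or.inl (h2a ▸ h1)
  · exact Or.inl (h1a ▸ h2)
  · exact Or.inr ⟨h1a.trans h2a, h1b.trans h2b⟩

theorem pvLexLe_antisymm {p q : Int × String} (h1 : pvLexLe p q) (h2 : pvLexLe q p) : p = q := by
  rcases h1 with h1 | ⟨h1a, h1b⟩ <;> rcases h2 with h2 | ⟨h2a, h2b⟩
  · exact absurd h2 (lt_asymm h1)
  · exact absurd h1 (h2a ▸ lt_irrefl _)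
  · exact absurd h2 (h1a ▸ lt_irrefl _)
  · exact Prod.ext h1a (le_antisymm h1b h2b)

-- ¬(p <lex q) → q ≤lex p, the strict lex comparison being the one both ports test.
theorem pvLexLe_of_not_lt {p q : Int × String} (h : ¬ (p.1 < q.1 ∨ (p.1 = q.1 ∧ p.2 < q.2))) : pvLexLe q p := by
  rcases lt_trichotomy p.1 q.1 with hlt | heq | hgt
  · exact absurd (Or.inl hlt) h
  · exact Or.inr ⟨heq.symm, not_lt.mp (fun hh => h (Or.inr ⟨heq, hh⟩))⟩
  · exact Or.inl hgt

-- The foldl inside max2?, started at some a: the result is a or a list element, and its key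
-- lex-dominates a's key and every key in the list.
theorem pv_max2_aux {α : Type} (k1 : α → Int) (k2 : α → String) :
    ∀ (l : List α) (a : α), ∃ m,
      List.foldl
        (fun acc x =>
          match acc with
          | none => some x
          | some m =>
            if (decide (k1 m < k1 x) || !decide (k1 x < k1 m) && decide (k2 m < k2 x)) = true
            then some x else some m)
        (some a) l = some m ∧
      (m = a ∨ m ∈ l) ∧ pvLexLe (k1 a, k2 a) (k1 m, k2 m) ∧
      ∀ y ∈ l, pvLexLe (k1 y, k2 y) (k1 m, k2 m) := by
  intro l
  induction l with
  | nil => intro a; exact ⟨a, rfl, Or.inl rfl, pvLexLe_refl _, by simp⟩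
  | cons x t ih =>
    intro a
    rw [List.foldl_cons]
    rw [show (match some a with
          | none => some x
          | some m =>
            if (decide (k1 m < k1 x) || !decide (k1 x < k1 m) && decide (k2 m < k2 x)) = true
            then some x else some m)
        = if (decide (k1 a < k1 x) || !decide (k1 x < k1 a) && decide (k2 a < k2 x)) = true
          then some x else some a from rfl]
    by_cases hc : (decide (k1 a < k1 x) || !decide (k1 x < k1 a) && decide (k2 a < k2 x)) = true
    · rw [if_pos hc]
      obtain ⟨m, hm, hmem, hle, hall⟩ := ih x
      refine ⟨m, hm, ?_, ?_, ?_⟩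
      · rcases hmem with h | h
        · exact Or.inr (h ▸ List.mem_cons_self)
        · exact Or.inr (List.mem_cons_of_mem _ h)
      · have hax : pvLexLe (k1 a, k2 a) (k1 x, k2 x) := by
          simp only [Bool.or_eq_true, Bool.and_eq_true, Bool.not_eq_true', decide_eq_true_eq,
            decide_eq_false_iff_not] at hc
          rcases lt_trichotomy (k1 a) (k1 x) with hlt | heq | hgt
          · exact Or.inl hlt
          · refine Or.inr ⟨heq, ?_⟩
            rcases hc with h | ⟨h1, h2⟩
            · exact absurd h (heq ▸ lt_irrefl _)
            · exact le_of_lt h2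
          · exfalso
            rcases hc with h | ⟨h1, h2⟩
            · exact absurd h (lt_asymm hgt)
            · exact h1 hgt
        exact pvLexLe_trans hax hle
      · intro y hy
        rcases List.mem_cons.mp hy with rfl | hy
        · exact hle
        · exact hall y hy
    · rw [if_neg hc]
      obtain ⟨m, hm, hmem, hle, hall⟩ := ih a
      refine ⟨m, hm, ?_, hle, ?_⟩
      · rcases hmem with h | h
        · exact Or.inl h
        · exact Or.inr (List.mem_cons_of_mem _ h)
      intro y hy
      rcases List.mem_cons.mp hy with rfl | hy
      · have hc' : ¬ (k1 a < k1 y ∨ (k1 a = k1 y ∧ k2 a < k2 y)) := by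
          intro hcon
          apply hc
          rcases hcon with h | ⟨h1, h2⟩
          · simp [h]
          · simp [h1, h2]
        exact pvLexLe_trans (pvLexLe_of_not_lt hc') hle
      · exact hall y hy

-- max2? of a nonempty list returns a member whose key lex-dominates every key.
theorem pv_max2_spec {α : Type} (k1 : α → Int) (k2 : α → String) (x : α) (t : List α) :
    ∃ m, PySem.List.max2? (x :: t) k1 k2 = some m ∧ m ∈ x :: t ∧
      ∀ y ∈ x :: t, pvLexLe (k1 y, k2 y) (k1 m, k2 m) := by
  obtain ⟨m, hm, hmem, hle, hall⟩ := pv_max2_aux k1 k2 t x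
  refine ⟨m, hm, ?_, ?_⟩
  · rcases hmem with rfl | h
    · exact List.mem_cons_self
    · exact List.mem_cons_of_mem _ h
  · intro y hy
    rcases List.mem_cons.mp hy with rfl | hy
    · exact hle
    · exact hall y hy

-- B's inner fold: the result is the initial pair or the key of a processed element, and it
-- lex-dominates the initial pair and every processed key.
theorem pv_bfold_spec (c : String → Int) :
    ∀ (l : List String) (init : Int × String),
      ∃ b, l.foldl
          (fun best r =>
            if best.1 < c r ∨ (best.1 = c r ∧ best.2 < r) then (c r, r) else best)
          init = b ∧
        (b = init ∨ ∃ r ∈ l, b = (c r, r)) ∧ pvLexLe init b ∧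
        ∀ r ∈ l, pvLexLe (c r, r) b := by
  intro l
  induction l with
  | nil => intro init; exact ⟨init, rfl, Or.inl rfl, pvLexLe_refl _, by simp⟩
  | cons x t ih =>
    intro init
    rw [List.foldl_cons]
    by_cases hc : init.1 < c x ∨ (init.1 = c x ∧ init.2 < x)
    · rw [if_pos hc]
      obtain ⟨b, hb, hmem, hle, hall⟩ := ih (c x, x)
      refine ⟨b, hb, ?_, ?_, ?_⟩
      · rcases hmem with h | ⟨r, hr, h⟩
        · exact Or.inr ⟨x, List.mem_cons_self, h⟩
        · exact Or.inr ⟨r, List.mem_cons_of_mem _ hr, h⟩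
      · have hinit : pvLexLe init (c x, x) := by
          rcases hc with h | ⟨h1, h2⟩
          · exact Or.inl h
          · exact Or.inr ⟨h1, le_of_lt h2⟩
        exact pvLexLe_trans hinit hle
      · intro r hr
        rcases List.mem_cons.mp hr with rfl | hr
        · exact hle
        · exact hall r hr
    · rw [if_neg hc]
      obtain ⟨b, hb, hmem, hle, hall⟩ := ih init
      refine ⟨b, hb, ?_, hle, ?_⟩
      · rcases hmem with h | ⟨r, hr, h⟩
        · exact Or.inl h
        · exact Or.inr ⟨r, List.mem_cons_of_mem _ hr, h⟩
      · intro r hr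
        rcases List.mem_cons.mp hr with rfl | hr
        · exact pvLexLe_trans (pvLexLe_of_not_lt hc) hle
        · exact hall r hr

-- ===== VERDICT (by name: the statement is the Claim_ definition above) =====
theorem most_common_reason_spec : Claim_equal_most_common_reason := by
  intro reasons fallback _
  simp only [Spec_most_common_reason, most_common_reason, most_common_reason_alt]
  have hflipA : (fun (d : PySem.Dict String Int) reason =>
      if reason = "" then d else d.insert reason (d.getD reason 0 + 1))
      = (fun d reason => if ¬ (reason = "") then d.insert reason (d.getD reason 0 + 1) else d) := by
    funext d r; by_cases h : r = "" <;> simp [h]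
  have hflipB : (fun (best : Int × String) r =>
      if r = "" then best
      else
        if best.1 < ((reasons.count r : Nat) : Int) ∨ (best.1 = ((reasons.count r : Nat) : Int) ∧ best.2 < r)
        then (((reasons.count r : Nat) : Int), r) else best)
      = (fun best r =>
        if ¬ (r = "") then
          (if best.1 < ((reasons.count r : Nat) : Int) ∨ (best.1 = ((reasons.count r : Nat) : Int) ∧ best.2 < r)
           then (((reasons.count r : Nat) : Int), r) else best)
        else best) := by
    funext b r; by_cases h : r = "" <;> simp [h]
  rw [hflipA, hflipB, PySem.List.foldl_ite_eq_foldl_filter, PySem.List.foldl_ite_eq_foldl_filter,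
    PySem.Dict.foldl_insert_getD_add_one_eq_counter, PySem.Dict.items_counter]
  set ne := reasons.filter (fun x => decide ¬ (x = "")) with hne
  have hcount : ∀ r ∈ ne, reasons.count r = ne.count r := by
    intro r hr
    have h1 : r ≠ "" := by simpa using List.of_mem_filter hr
    exact (List.count_filter (by simp [h1])).symm
  cases hn : ne with
  | nil =>
    simp [PySem.Set.ofList]
  | cons x t =>
    have hxS : x ∈ PySem.Set.ofList ne := by
      rw [PySem.Set.mem_ofList]; exact hn ▸ List.mem_cons_self
    obtain ⟨S0, St, hS⟩ : ∃ S0 St, PySem.Set.ofList ne = S0 :: St := by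
      cases hSx : PySem.Set.ofList ne with
      | nil => rw [hSx] at hxS; cases hxS
      | cons a b => exact ⟨a, b, rfl⟩
    rw [← hn, hS]
    simp only [List.map_cons]
    rw [if_neg (by simp)]
    obtain ⟨m, hm, hmmem, hmall⟩ := pv_max2_spec
      (fun kv : String × Int => kv.2) (fun kv : String × Int => kv.1)
      (S0, (ne.count S0 : Int)) (St.map (fun k => (k, (ne.count k : Int))))
    rw [hm]
    obtain ⟨ka, hka_ne, hka_eq⟩ : ∃ ka, ka ∈ ne ∧ m = (ka, (ne.count ka : Int)) := by
      have hmm : m ∈ (S0 :: St).map (fun k => (k, (ne.count k : Int))) := by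
        simpa using hmmem
      obtain ⟨ka, hka, hkam⟩ := List.mem_map.mp hmm
      exact ⟨ka, (PySem.Set.mem_ofList _ _).mp (hS ▸ hka), hkam.symm⟩
    obtain ⟨b, hb, hbmem, _, hball⟩ := pv_bfold_spec (fun r => (reasons.count r : Int)) ne (0, fallback)
    rw [hb]
    have hxne : x ∈ ne := hn ▸ List.mem_cons_self
    have hxb : pvLexLe ((reasons.count x : Int), x) b := hball x hxne
    have hxcpos : (0 : Int) < (reasons.count x : Int) := by
      have : 0 < ne.count x := List.count_pos_iff.mpr hxne
      have h2 := hcount x hxne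
      exact_mod_cast h2 ▸ this
    obtain ⟨rb, hrb_ne, hrb_eq⟩ : ∃ rb, rb ∈ ne ∧ b = ((reasons.count rb : Int), rb) := by
      rcases hbmem with h | ⟨r, hr, h⟩
      · exfalso
        rw [h] at hxb
        rcases hxb with hlt | ⟨heq, _⟩
        · simp only [] at hlt; omega
        · simp only [] at heq; omega
      · exact ⟨r, hr, h⟩
    have hA_dom : pvLexLe ((ne.count rb : Int), rb) ((ne.count ka : Int), ka) := by
      have hy : ((rb, (ne.count rb : Int)) : String × Int)
          ∈ (S0 :: St).map (fun k => (k, (ne.count k : Int))) := by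
        exact List.mem_map.mpr ⟨rb, hS ▸ (PySem.Set.mem_ofList _ _).mpr hrb_ne, rfl⟩
      have h := hmall _ hy
      rw [hka_eq] at h
      exact h
    have hB_dom : pvLexLe ((ne.count ka : Int), ka) ((ne.count rb : Int), rb) := by
      have h := hball ka hka_ne
      rw [hrb_eq] at h
      rw [show ((reasons.count ka : Nat) : Int) = ((ne.count ka : Nat) : Int) by exact_mod_cast hcount ka hka_ne,
        show ((reasons.count rb : Nat) : Int) = ((ne.count rb : Nat) : Int) by exact_mod_cast hcount rb hrb_ne] at h
      exact h
    have hkey := pvLexLe_antisymm hA_dom hB_dom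
    have hrbka : rb = ka := congrArg Prod.snd hkey
    rw [hka_eq, hrb_eq]
    simp [hrbka]
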